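-- pv_equiv track=rewrite | github.com/Rouzihiro/dotfiles | .local/bin/python/replace-in-file.py | parse_line_spec
-- ===== SOURCE A (Python) =====
-- from typing import Tuple, Optional, List
--
-- def parse_line_spec(spec: str, max_lines: int) -> List[int]:
--     """Parse line specification like '5', '1-10', or '1,5,10'."""
--     try:
--         result = []
--
--         # Handle comma-separated list
--         if ',' in spec:
--             parts = spec.split(',')
--             for part in parts:
--                 part = part.strip()
--                 if '-' in part:
--                     # Range like 1-10
--                     start_str, end_str = part.split('-', 1)
--                     start = int(start_str.strip())
--                     end = int(end_str.strip())
--                     result.extend(range(start, end + 1))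
--                 else:
--                     # Single number
--                     result.append(int(part))
--
--         # Handle range like 1-10
--         elif '-' in spec:
--             start_str, end_str = spec.split('-', 1)
--             start = int(start_str.strip())
--             end = int(end_str.strip())
--             result = list(range(start, end + 1))
--
--         # Handle single number
--         else:
--             result.append(int(spec))
--
--         # Filter out invalid line numbers
--         result = [i for i in result if 1 <= i <= max_lines]
--
--         # Remove duplicates and sort
--         result = sorted(set(result))
--
--         return result
--
--     except ValueError:
--         return []
-- ===== SOURCE B (Python) =====
-- def parse_line_spec(spec, max_lines):
--     """Parse line specification like '5', '1-10', or '1,5,10'."""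
--     # Phase 1: parse the spec into a list of (lo, hi) intervals (a single
--     # number n becomes (n, n)); int() itself strips whitespace.
--     try:
--         intervals = []
--         for part in spec.split(','):
--             if '-' in part:
--                 a, b = part.split('-', 1)
--                 intervals.append((int(a), int(b)))
--             else:
--                 n = int(part)
--                 intervals.append((n, n))
--     except ValueError:
--         return []
--     # Phase 2: sort intervals by start and sweep once, emitting each covered
--     # line in [1, max_lines] exactly once, in increasing order -- no expansion
--     # of out-of-range spans, no set(), no final sort.
--     intervals.sort(key=lambda p: p[0])
--     result = []
--     bound = 0  # highest line number emitted so far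
--     for lo, hi in intervals:
--         lo = max(lo, 1, bound + 1)
--         hi = min(hi, max_lines)
--         if lo <= hi:
--             result.extend(range(lo, hi + 1))
--             bound = hi
--     return result
-- ===== Notes on version B (the rewrite author's own statement) =====
-- stated objective: alternative
-- what changed: B parses the spec into (lo,hi) interval pairs, sorts them by start and merge-sweeps once, emitting each covered line of [1, max_lines] in increasing order, instead of A's pipeline that expands every range, filters to [1, max_lines], deduplicates with set() and sorts the expanded numbers; B never materialises out-of-range spans and needs no set() or final sort.
import Mathlib
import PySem

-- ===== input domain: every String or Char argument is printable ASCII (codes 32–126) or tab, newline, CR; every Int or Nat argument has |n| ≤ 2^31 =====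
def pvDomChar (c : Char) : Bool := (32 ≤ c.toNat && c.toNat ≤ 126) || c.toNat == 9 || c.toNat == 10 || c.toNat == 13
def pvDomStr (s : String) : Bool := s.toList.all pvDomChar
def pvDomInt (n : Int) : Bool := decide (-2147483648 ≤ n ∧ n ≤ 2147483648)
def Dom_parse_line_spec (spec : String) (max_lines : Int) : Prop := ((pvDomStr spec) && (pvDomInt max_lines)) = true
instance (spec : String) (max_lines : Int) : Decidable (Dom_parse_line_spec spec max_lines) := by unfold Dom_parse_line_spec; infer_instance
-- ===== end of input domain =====

-- B uses a different algorithm: it parses the spec into (lo, hi) intervals, sorts them by start and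
-- merge-sweeps once, emitting each covered line of [1, max_lines] in order — instead of A's
-- expand-every-range / filter / set() / sort pipeline (objective: alternative).

-- ===== PORT A =====
-- body of A's `for part in parts:` loop (comma branch); a ValueError is the Option's none,
-- which collapses the whole computation as the try/except does
def pvLoopA (acc? : Option (List Int)) (part : List Char) : Option (List Int) :=
  match acc? with
  | none => none
  | some res =>
    let p := PySem.Chars.strip part
    if PySem.Chars.isIn ['-'] p then
      match PySem.Chars.splitMax? p ['-'] 1 with
      | some (s1 :: s2 :: _) =>
        match PySem.Int.ofChars? (PySem.Chars.strip s1), PySem.Int.ofChars? (PySem.Chars.strip s2) with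
        | some st, some en => some (res ++ PySem.List.pyRange st (en + 1) 1)
        | _, _ => none
      | _ => none
    else
      match PySem.Int.ofChars? p with
      | some n => some (res ++ [n])
      | none => none

-- literal transliteration of A: three branches, then filter, then sorted(set(...))
def parse_line_spec (spec : String) (max_lines : Int) : List Int :=
  let res? : Option (List Int) :=
    if PySem.Chars.isIn [','] spec.toList then
      (PySem.Chars.splitOn spec.toList [',']).foldl pvLoopA (some [])
    else if PySem.Chars.isIn ['-'] spec.toList then
      match PySem.Chars.splitMax? spec.toList ['-'] 1 with
      | some (s1 :: s2 :: _) =>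
        match PySem.Int.ofChars? (PySem.Chars.strip s1), PySem.Int.ofChars? (PySem.Chars.strip s2) with
        | some st, some en => some (PySem.List.pyRange st (en + 1) 1)
        | _, _ => none
      | _ => none
    else
      (PySem.Int.ofChars? spec.toList).map (fun n => [n])
  match res? with
  | none => []
  | some res =>
      PySem.List.sorted
        (PySem.Set.ofList (res.filter (fun i => decide (1 ≤ i) && decide (i ≤ max_lines))))
        (fun x => x) false

-- ===== PORT B =====
-- phase 1 of Source B: body of the parsing loop, collecting (lo, hi) interval pairs
def pvParseB (acc? : Option (List (Int × Int))) (part : List Char) : Option (List (Int × Int)) :=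
  match acc? with
  | none => none
  | some ivs =>
    if PySem.Chars.isIn ['-'] part then
      match PySem.Chars.splitMax? part ['-'] 1 with
      | some (a :: b :: _) =>
        match PySem.Int.ofChars? a, PySem.Int.ofChars? b with
        | some lo, some hi => some (ivs ++ [(lo, hi)])
        | _, _ => none
      | _ => none
    else
      match PySem.Int.ofChars? part with
      | some n => some (ivs ++ [(n, n)])
      | none => none

-- phase 2 of Source B: one sweep step over the lo-sorted intervals; state = (result, bound)
def pvSweep (max_lines : Int) (st : List Int × Int) (p : Int × Int) : List Int × Int :=
  let lo := max (max p.1 1) (st.2 + 1)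
  let hi := min p.2 max_lines
  if lo ≤ hi then (st.1 ++ PySem.List.pyRange lo (hi + 1) 1, hi) else st

-- literal transliteration of B: parse into intervals, sort by start, merge sweep
def parse_line_spec_alt (spec : String) (max_lines : Int) : List Int :=
  match (PySem.Chars.splitOn spec.toList [',']).foldl pvParseB (some []) with
  | none => []
  | some ivs =>
      ((PySem.List.sorted ivs (fun p => p.1) false).foldl (pvSweep max_lines) ([], 0)).1

-- ===== PRECONDITION & SPEC =====
def Spec_parse_line_spec (spec : String) (max_lines : Int) (out : List Int) : Prop := out = parse_line_spec_alt spec max_lines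
instance (spec : String) (max_lines : Int) (out : List Int) : Decidable (Spec_parse_line_spec spec max_lines out) := by unfold Spec_parse_line_spec; infer_instance

-- ===== CLAIM (what is proved, stated in full; the proofs are below) =====
def Claim_equal_parse_line_spec : Prop := ∀ (spec : String) (max_lines : Int), Dom_parse_line_spec spec max_lines → Spec_parse_line_spec spec max_lines (parse_line_spec spec max_lines)

-- ===== LEMMAS AND PROOFS =====

-- membership unaffected by dropWhile for an element the predicate rejects
theorem pv_mem_dropWhile_iff {α : Type} (p : α → Bool) (c : α) (hc : p c = false) :
    ∀ l : List α, c ∈ l.dropWhile p ↔ c ∈ l := by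
  intro l
  induction l with
  | nil => simp
  | cons a l ih =>
    by_cases h : p a = true
    · rw [List.dropWhile_cons_of_pos h, ih]
      constructor
      · exact fun hm => List.mem_cons_of_mem _ hm
      · intro hm
        rcases List.mem_cons.mp hm with rfl | hm
        · rw [hc] at h; cases h
        · exact hm
    · rw [List.dropWhile_cons_of_neg h]

theorem pv_isspace_dash : PySem.Chars.isspace '-' = false := by decide

theorem pv_space_ne_dash (c : Char) (h : PySem.Chars.isspace c = true) : (c != '-') = true := by
  cases hc : c == '-'
  · simpa using hc
  · rw [show c = '-' from by simpa using hc, pv_isspace_dash] at h; cases h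

theorem pv_mem_lstrip_dash (s : List Char) : '-' ∈ PySem.Chars.lstrip s ↔ '-' ∈ s := by
  simp [PySem.Chars.lstrip, pv_mem_dropWhile_iff _ _ pv_isspace_dash]

theorem pv_mem_rstrip_dash (s : List Char) : '-' ∈ PySem.Chars.rstrip s ↔ '-' ∈ s := by
  simp [PySem.Chars.rstrip, pv_mem_dropWhile_iff _ _ pv_isspace_dash]

theorem pv_mem_strip_dash (s : List Char) : '-' ∈ PySem.Chars.strip s ↔ '-' ∈ s := by
  simp [PySem.Chars.strip, pv_mem_rstrip_dash, pv_mem_lstrip_dash]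

theorem pv_isIn_singleton (a : Char) (s : List Char) :
    PySem.Chars.isIn [a] s = true ↔ a ∈ s := by
  rw [PySem.Chars.isIn_iff_infix, List.singleton_infix_iff]

-- dropWhile absorbs an earlier dropWhile by a weaker predicate
theorem pv_dropWhile_dropWhile {α : Type} (p q : α → Bool) :
    ∀ l : List α, (∀ c ∈ l, q c = true → p c = true) →
    (l.dropWhile q).dropWhile p = l.dropWhile p := by
  intro l
  induction l with
  | nil => simp
  | cons a l ih =>
    intro h
    by_cases hq : q a = true
    · rw [List.dropWhile_cons_of_pos hq, List.dropWhile_cons_of_pos (h a (List.mem_cons_self) hq),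
        ih (fun c hc => h c (List.mem_cons_of_mem _ hc))]
    · rw [List.dropWhile_cons_of_neg hq]

theorem pv_rdrop_cons (q : Char → Bool) (c : Char) (cs : List Char)
    (he : ¬ (cs.reverse.dropWhile q).isEmpty = true) :
    ((c :: cs).reverse.dropWhile q).reverse = c :: (cs.reverse.dropWhile q).reverse := by
  rw [List.reverse_cons, List.dropWhile_append, if_neg he]
  simp

theorem pv_rdrop_all (q : Char → Bool) (l : List Char) (h : ∀ x ∈ l, q x = true) :
    (l.reverse.dropWhile q).reverse = [] := by
  rw [List.dropWhile_eq_nil_iff.mpr (fun x hx => h x (by simpa using hx))]; rfl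

-- front-trim and back-trim commute
theorem pv_dropWhile_comm (p q : Char → Bool) :
    ∀ l : List Char,
    (((l.reverse.dropWhile q).reverse).dropWhile p) = ((l.dropWhile p).reverse.dropWhile q).reverse := by
  intro l
  induction l with
  | nil => simp
  | cons c cs ih =>
    by_cases he : (cs.reverse.dropWhile q).isEmpty = true
    · have hall : ∀ x ∈ cs, q x = true := by
        intro x hx
        exact (List.dropWhile_eq_nil_iff).mp (List.isEmpty_iff.mp he) x (by simpa using hx)
      have hc : ((c :: cs).reverse.dropWhile q).reverse = if q c then [] else [c] := by
        rw [List.reverse_cons, List.dropWhile_append, if_pos he]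
        by_cases hq : q c = true <;> simp [List.dropWhile_cons, hq]
      rw [hc]
      by_cases hp : p c = true
      · rw [List.dropWhile_cons_of_pos hp,
          pv_rdrop_all q _ (fun x hx => hall x ((List.dropWhile_sublist p).subset hx))]
        by_cases hq : q c = true <;> simp [List.dropWhile_cons, hq, hp]
      · rw [List.dropWhile_cons_of_neg hp, List.reverse_cons, List.dropWhile_append, if_pos he]
        by_cases hq : q c = true <;> simp [List.dropWhile_cons, hq, hp]
    · rw [pv_rdrop_cons q c cs he]
      by_cases hp : p c = true
      · rw [List.dropWhile_cons_of_pos hp, List.dropWhile_cons_of_pos hp, ih]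
      · rw [List.dropWhile_cons_of_neg hp, List.dropWhile_cons_of_neg hp, pv_rdrop_cons q c cs he]

-- characterisation of int()'s own whitespace stripping core
def pvStripInt (s : List Char) : List Char :=
  ((s.dropWhile PySem.Int.isIntSpace).reverse.dropWhile PySem.Int.isIntSpace).reverse

theorem pv_ofChars_congr (s t : List Char) (h : pvStripInt s = pvStripInt t) :
    PySem.Int.ofChars? s = PySem.Int.ofChars? t := by
  unfold PySem.Int.ofChars?
  unfold pvStripInt at h
  rw [h]

theorem pv_char_of_toNat (a b : Char) (h : a.toNat = b.toNat) : a = b := by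
  apply Char.ext; exact UInt32.toNat_inj.mp h

-- chars of the admitted domain: str-whitespace is also int()-whitespace
theorem pv_dom_space (c : Char) (hd : pvDomChar c = true)
    (hs : PySem.Chars.isspace c = true) : PySem.Int.isIntSpace c = true := by
  unfold pvDomChar at hd
  unfold PySem.Chars.isspace at hs
  simp only [Bool.or_eq_true, Bool.and_eq_true, decide_eq_true_eq, beq_iff_eq] at hd hs
  have : c.toNat = 32 ∨ c.toNat = 9 ∨ c.toNat = 10 ∨ c.toNat = 13 := by omega
  rcases this with h | h | h | h <;>
    [ have : c = ' ' := pv_char_of_toNat _ _ (by rw [h]; rfl);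
      have : c = '\t' := pv_char_of_toNat _ _ (by rw [h]; rfl);
      have : c = '\n' := pv_char_of_toNat _ _ (by rw [h]; rfl);
      have : c = '\r' := pv_char_of_toNat _ _ (by rw [h]; rfl)] <;>
    subst this <;> decide

def pvGood (l : List Char) : Prop := ∀ c ∈ l, PySem.Chars.isspace c = true → PySem.Int.isIntSpace c = true

theorem pv_good_of_sublist {l m : List Char} (h : l.Sublist m) (hm : pvGood m) : pvGood l :=
  fun c hc => hm c (h.subset hc)

theorem pv_stripInt_lstrip (s : List Char) (h : pvGood s) :
    pvStripInt (PySem.Chars.lstrip s) = pvStripInt s := by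
  unfold pvStripInt PySem.Chars.lstrip
  rw [pv_dropWhile_dropWhile _ _ s h]

theorem pv_stripInt_rstrip (s : List Char) (h : pvGood s) :
    pvStripInt (PySem.Chars.rstrip s) = pvStripInt s := by
  unfold pvStripInt PySem.Chars.rstrip
  rw [show ((s.reverse.dropWhile PySem.Chars.isspace).reverse).dropWhile PySem.Int.isIntSpace
      = ((s.dropWhile PySem.Int.isIntSpace).reverse.dropWhile PySem.Chars.isspace).reverse
      from pv_dropWhile_comm _ _ s]
  rw [List.reverse_reverse]
  rw [pv_dropWhile_dropWhile _ _ _ (fun c hc hq =>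
    h c ((List.dropWhile_sublist _).subset (List.mem_reverse.mp hc)) hq)]

theorem pv_ofChars_lstrip (s : List Char) (h : pvGood s) :
    PySem.Int.ofChars? (PySem.Chars.lstrip s) = PySem.Int.ofChars? s :=
  pv_ofChars_congr _ _ (pv_stripInt_lstrip s h)

theorem pv_ofChars_rstrip (s : List Char) (h : pvGood s) :
    PySem.Int.ofChars? (PySem.Chars.rstrip s) = PySem.Int.ofChars? s :=
  pv_ofChars_congr _ _ (pv_stripInt_rstrip s h)

theorem pv_good_lstrip (s : List Char) (h : pvGood s) : pvGood (PySem.Chars.lstrip s) :=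
  pv_good_of_sublist (List.dropWhile_sublist _) h

theorem pv_good_rstrip (s : List Char) (h : pvGood s) : pvGood (PySem.Chars.rstrip s) := by
  intro c hc
  unfold PySem.Chars.rstrip at hc
  rw [List.mem_reverse] at hc
  exact h c (List.mem_reverse.mp ((List.dropWhile_sublist _).subset hc))

-- int() is blind to str-whitespace trimming (on pvGood strings)
theorem pv_ofChars_strip (s : List Char) (h : pvGood s) :
    PySem.Int.ofChars? (PySem.Chars.strip s) = PySem.Int.ofChars? s := by
  unfold PySem.Chars.strip
  rw [pv_ofChars_rstrip _ (pv_good_lstrip s h), pv_ofChars_lstrip s h]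

-- split(',') of a comma-free string is the singleton list
theorem pv_go_no_sep (sep : List Char) (hsep : sep ≠ []) :
    ∀ (fuel : Nat) (l cur : List Char) (acc : List (List Char)),
    (∀ c ∈ sep, c ∉ l) →
    PySem.Chars.splitOn.go sep fuel l cur acc = ((cur.reverse ++ l) :: acc).reverse := by
  intro fuel
  induction fuel with
  | zero => intro l cur acc _; simp [PySem.Chars.splitOn.go]
  | succ n ih =>
    intro l cur acc hn
    cases l with
    | nil => simp [PySem.Chars.splitOn.go]
    | cons c rest =>
      rw [PySem.Chars.splitOn.go]
      have hpre : sep.isPrefixOf (c :: rest) = false := by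
        cases hps : sep.isPrefixOf (c :: rest)
        · rfl
        · exfalso
          rcases sep with _ | ⟨s0, stl⟩
          · exact hsep rfl
          · have := List.IsPrefix.subset (List.isPrefixOf_iff_prefix.mp hps) (List.mem_cons_self)
            exact hn s0 List.mem_cons_self this
      rw [hpre]
      simp only [Bool.false_eq_true, if_false]
      rw [ih rest (c :: cur) acc (fun d hd hm => hn d hd (List.mem_cons_of_mem _ hm))]
      simp

theorem pv_splitOn_no_sep (s : List Char) (h : ',' ∉ s) :
    PySem.Chars.splitOn s [','] = [s] := by
  unfold PySem.Chars.splitOn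
  rw [pv_go_no_sep [','] (by simp) _ s [] [] (by simpa using h)]
  simp

-- split('-', 1) of a string containing '-' cuts at the first '-'
theorem pv_goMax_m0 (sep : List Char) :
    ∀ (fuel : Nat) (l cur : List Char) (acc : List (List Char)),
    PySem.Chars.splitOnMax.go sep fuel 0 l cur acc = ((cur.reverse ++ l) :: acc).reverse := by
  intro fuel l cur acc
  cases fuel with
  | zero => simp [PySem.Chars.splitOnMax.go]
  | succ n => cases l with
    | nil => simp [PySem.Chars.splitOnMax.go]
    | cons c rest => rw [PySem.Chars.splitOnMax.go]; simp

theorem pv_goMax_dash :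
    ∀ (fuel : Nat) (l cur : List Char) (acc : List (List Char)), l.length ≤ fuel →
    PySem.Chars.splitOnMax.go ['-'] fuel 1 l cur acc =
      if '-' ∈ l then
        acc.reverse ++ [cur.reverse ++ l.takeWhile (fun c => c != '-'), (l.dropWhile (fun c => c != '-')).tail]
      else acc.reverse ++ [cur.reverse ++ l] := by
  intro fuel
  induction fuel with
  | zero =>
    intro l cur acc hl
    have : l = [] := List.length_eq_zero_iff.mp (Nat.le_zero.mp hl)
    subst this
    simp [PySem.Chars.splitOnMax.go]
  | succ n ih =>
    intro l cur acc hl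
    cases l with
    | nil => simp [PySem.Chars.splitOnMax.go]
    | cons c rest =>
      rw [PySem.Chars.splitOnMax.go]
      simp only [if_neg (by omega : ¬ (1 : Nat) = 0)]
      by_cases hc : c = '-'
      · subst hc
        have hpre : (['-'] : List Char).isPrefixOf ('-' :: rest) = true := by simp [List.isPrefixOf]
        rw [if_pos hpre]
        show PySem.Chars.splitOnMax.go ['-'] n 0 (List.drop 1 ('-' :: rest)) [] (cur.reverse :: acc) = _
        rw [pv_goMax_m0]
        simp [List.takeWhile_cons, List.dropWhile_cons]
      · have hpre : (['-'] : List Char).isPrefixOf (c :: rest) = false := by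
          simp [List.isPrefixOf, hc]
          exact fun h => hc h.symm
        rw [if_neg (by simp [hpre])]
        show PySem.Chars.splitOnMax.go ['-'] n 1 rest (c :: cur) acc = _
        rw [ih rest (c :: cur) acc (by simpa using hl)]
        have hm : ('-' ∈ c :: rest) ↔ ('-' ∈ rest) := by
          constructor
          · intro h; rcases List.mem_cons.mp h with h | h
            · exact absurd h.symm hc
            · exact h
          · exact List.mem_cons_of_mem _
        by_cases hr : '-' ∈ rest
        · rw [if_pos hr, if_pos (hm.mpr hr)]
          simp [List.takeWhile_cons, List.dropWhile_cons, hc]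
        · rw [if_neg hr, if_neg (fun h => hr (hm.mp h))]
          simp [hc]

theorem pv_splitOnMax_dash (l : List Char) (h : '-' ∈ l) :
    PySem.Chars.splitOnMax l ['-'] 1 =
      [l.takeWhile (fun c => c != '-'), (l.dropWhile (fun c => c != '-')).tail] := by
  unfold PySem.Chars.splitOnMax
  rw [if_neg (by omega : ¬ (1 : Int) < 0)]
  rw [show ((1 : Int).toNat) = 1 from rfl]
  rw [pv_goMax_dash (l.length + 1) l [] [] (by omega)]
  simp [h]

-- every part of split draws its characters from the original string
theorem pv_go_chars (sep : List Char) (PR : Char → Prop) :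
    ∀ (fuel : Nat) (l cur : List Char) (acc : List (List Char)),
    (∀ c ∈ l, PR c) → (∀ c ∈ cur, PR c) → (∀ part ∈ acc, ∀ c ∈ part, PR c) →
    ∀ part ∈ PySem.Chars.splitOn.go sep fuel l cur acc, ∀ c ∈ part, PR c := by
  intro fuel
  induction fuel with
  | zero =>
    intro l cur acc hl hcur hacc part hp
    simp only [PySem.Chars.splitOn.go] at hp
    rw [List.mem_reverse] at hp
    rcases List.mem_cons.mp hp with rfl | hp
    · intro c hc
      rcases List.mem_append.mp hc with h | h
      · exact hcur c (List.mem_reverse.mp h)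
      · exact hl c h
    · exact hacc part hp
  | succ n ih =>
    intro l cur acc hl hcur hacc part hp
    cases l with
    | nil =>
      simp only [PySem.Chars.splitOn.go] at hp
      rw [List.mem_reverse] at hp
      rcases List.mem_cons.mp hp with rfl | hp
      · exact fun c hc => hcur c (List.mem_reverse.mp hc)
      · exact hacc part hp
    | cons a rest =>
      rw [PySem.Chars.splitOn.go] at hp
      by_cases hpre : sep.isPrefixOf (a :: rest) = true
      · rw [if_pos hpre] at hp
        refine ih _ [] _ (fun c hc => hl c (List.drop_subset _ _ hc)) (by simp) ?_ part hp
        intro q hq c hc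
        rcases List.mem_cons.mp hq with rfl | hq
        · exact hcur c (List.mem_reverse.mp hc)
        · exact hacc q hq c hc
      · rw [if_neg hpre] at hp
        refine ih rest (a :: cur) acc (fun c hc => hl c (List.mem_cons_of_mem _ hc)) ?_ hacc part hp
        intro c hc
        rcases List.mem_cons.mp hc with rfl | hc
        · exact hl c List.mem_cons_self
        · exact hcur c hc

theorem pv_splitOn_chars (s sep : List Char) (PR : Char → Prop) (hs : ∀ c ∈ s, PR c) :
    ∀ part ∈ PySem.Chars.splitOn s sep, ∀ c ∈ part, PR c := by
  unfold PySem.Chars.splitOn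
  exact pv_go_chars sep PR _ s [] [] hs (by simp) (by simp)

-- strip commutes with cutting at the first '-'
theorem pv_takeWhile_lstrip (s : List Char) :
    (s.dropWhile PySem.Chars.isspace).takeWhile (fun c => c != '-')
      = (s.takeWhile (fun c => c != '-')).dropWhile PySem.Chars.isspace := by
  induction s with
  | nil => simp
  | cons c cs ih =>
    by_cases hq : PySem.Chars.isspace c = true
    · simp only [List.dropWhile_cons, List.takeWhile_cons, hq, if_true, pv_space_ne_dash c hq, ih]
    · by_cases hh : (c != '-') = true <;>
        simp [List.dropWhile_cons, List.takeWhile_cons, hq, hh]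

theorem pv_dropWhile_lstrip (s : List Char) :
    (s.dropWhile PySem.Chars.isspace).dropWhile (fun c => c != '-')
      = s.dropWhile (fun c => c != '-') := by
  induction s with
  | nil => simp
  | cons c cs ih =>
    by_cases hq : PySem.Chars.isspace c = true
    · simp only [List.dropWhile_cons, hq, if_true, pv_space_ne_dash c hq, ih]
    · simp [List.dropWhile_cons, hq]

theorem pv_takeWhile_rstrip (x : List Char) (h : '-' ∈ x) :
    (PySem.Chars.rstrip x).takeWhile (fun c => c != '-') = x.takeWhile (fun c => c != '-') := by
  unfold PySem.Chars.rstrip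
  induction x with
  | nil => cases h
  | cons c cs ih =>
    by_cases he : (cs.reverse.dropWhile PySem.Chars.isspace).isEmpty = true
    · have hall : ∀ y ∈ cs, PySem.Chars.isspace y = true := by
        intro y hy
        exact (List.dropWhile_eq_nil_iff).mp (List.isEmpty_iff.mp he) y (by simpa using hy)
      have hcd : c = '-' := by
        rcases List.mem_cons.mp h with rfl | hm
        · rfl
        · have := pv_space_ne_dash '-' (hall '-' hm); simp at this
      subst hcd
      rw [List.reverse_cons, List.dropWhile_append, if_pos he]
      rw [List.dropWhile_cons_of_neg (by simp [pv_isspace_dash])]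
      simp [List.takeWhile_cons]
    · rw [pv_rdrop_cons _ c cs he]
      by_cases hh : (c != '-') = true
      · simp only [List.takeWhile_cons, hh, if_true]
        have hm : '-' ∈ cs := by
          rcases List.mem_cons.mp h with rfl | hm
          · simp at hh
          · exact hm
        rw [ih hm]
      · simp [List.takeWhile_cons, hh]

theorem pv_dropWhile_rstrip (x : List Char) (h : '-' ∈ x) :
    ((PySem.Chars.rstrip x).dropWhile (fun c => c != '-')).tail
      = PySem.Chars.rstrip ((x.dropWhile (fun c => c != '-')).tail) := by
  unfold PySem.Chars.rstrip
  induction x with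
  | nil => cases h
  | cons c cs ih =>
    by_cases he : (cs.reverse.dropWhile PySem.Chars.isspace).isEmpty = true
    · have hall : ∀ y ∈ cs, PySem.Chars.isspace y = true := by
        intro y hy
        exact (List.dropWhile_eq_nil_iff).mp (List.isEmpty_iff.mp he) y (by simpa using hy)
      have hcd : c = '-' := by
        rcases List.mem_cons.mp h with rfl | hm
        · rfl
        · have := pv_space_ne_dash '-' (hall '-' hm); simp at this
      subst hcd
      rw [List.reverse_cons, List.dropWhile_append, if_pos he]
      rw [List.dropWhile_cons_of_neg (by simp [pv_isspace_dash])]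
      rw [List.dropWhile_cons_of_neg (by simp)]
      simp only [List.tail_cons]
      rw [List.dropWhile_eq_nil_iff.mpr (fun y hy => hall y (by simpa using hy))]
      simp
    · rw [pv_rdrop_cons _ c cs he]
      by_cases hh : (c != '-') = true
      · simp only [List.dropWhile_cons, hh, if_true]
        have hm : '-' ∈ cs := by
          rcases List.mem_cons.mp h with rfl | hm
          · simp at hh
          · exact hm
        exact ih hm
      · simp only [List.dropWhile_cons, hh, if_false, List.tail_cons]
        rfl

theorem pv_takeWhile_strip (s : List Char) (h : '-' ∈ s) :
    (PySem.Chars.strip s).takeWhile (fun c => c != '-') =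
      PySem.Chars.lstrip (s.takeWhile (fun c => c != '-')) := by
  unfold PySem.Chars.strip
  rw [pv_takeWhile_rstrip _ ((pv_mem_lstrip_dash s).mpr h)]
  unfold PySem.Chars.lstrip
  exact pv_takeWhile_lstrip s

theorem pv_dropWhile_strip (s : List Char) (h : '-' ∈ s) :
    ((PySem.Chars.strip s).dropWhile (fun c => c != '-')).tail =
      PySem.Chars.rstrip ((s.dropWhile (fun c => c != '-')).tail) := by
  unfold PySem.Chars.strip
  rw [pv_dropWhile_rstrip _ ((pv_mem_lstrip_dash s).mpr h)]
  unfold PySem.Chars.lstrip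
  rw [pv_dropWhile_lstrip s]

-- the values A parses from a dash part equal the values B parses (int() ignores the extra strips)
theorem pv_dash_values (part : List Char) (hg : pvGood part) (h : '-' ∈ part) :
    PySem.Int.ofChars? (PySem.Chars.strip ((PySem.Chars.strip part).takeWhile (fun c => c != '-')))
        = PySem.Int.ofChars? (part.takeWhile (fun c => c != '-')) ∧
    PySem.Int.ofChars? (PySem.Chars.strip (((PySem.Chars.strip part).dropWhile (fun c => c != '-')).tail))
        = PySem.Int.ofChars? ((part.dropWhile (fun c => c != '-')).tail) := by
  have hga : pvGood (part.takeWhile (fun c => c != '-')) :=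
    pv_good_of_sublist (List.takeWhile_sublist _) hg
  have hgb : pvGood ((part.dropWhile (fun c => c != '-')).tail) :=
    pv_good_of_sublist ((List.tail_sublist _).trans (List.dropWhile_sublist _)) hg
  constructor
  · rw [pv_takeWhile_strip _ h, pv_ofChars_strip _ (pv_good_lstrip _ hga), pv_ofChars_lstrip _ hga]
  · rw [pv_dropWhile_strip _ h, pv_ofChars_strip _ (pv_good_rstrip _ hgb), pv_ofChars_rstrip _ hgb]

-- invariant between A's expanded accumulator and B's interval accumulator: same covered numbers
def pvRel (res : List Int) (ivs : List (Int × Int)) : Prop :=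
  ∀ x : Int, x ∈ res ↔ ∃ p ∈ ivs, p.1 ≤ x ∧ x ≤ p.2

theorem pv_rel_nil : pvRel [] [] := by
  intro x; simp

theorem pv_rel_range (res : List Int) (ivs : List (Int × Int)) (hr : pvRel res ivs) (st en : Int) :
    pvRel (res ++ PySem.List.pyRange st (en + 1) 1) (ivs ++ [(st, en)]) := by
  intro x
  simp only [List.mem_append, hr x, PySem.List.mem_pyRange_one, List.mem_singleton]
  constructor
  · rintro (⟨p, hp, h1, h2⟩ | ⟨h1, h2⟩)
    · exact ⟨p, Or.inl hp, h1, h2⟩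
    · exact ⟨(st, en), Or.inr rfl, h1, by omega⟩
  · rintro ⟨p, hp | rfl, h1, h2⟩
    · exact Or.inl ⟨p, hp, h1, h2⟩
    · exact Or.inr ⟨h1, by omega⟩

theorem pv_rel_single (res : List Int) (ivs : List (Int × Int)) (hr : pvRel res ivs) (n : Int) :
    pvRel (res ++ [n]) (ivs ++ [(n, n)]) := by
  intro x
  simp only [List.mem_append, hr x, List.mem_singleton]
  constructor
  · rintro (⟨p, hp, h1, h2⟩ | hx)
    · exact ⟨p, Or.inl hp, h1, h2⟩
    · exact ⟨(n, n), Or.inr rfl, by omega, by omega⟩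
  · rintro ⟨p, hp | rfl, h1, h2⟩
    · exact Or.inl ⟨p, hp, h1, h2⟩
    · exact Or.inr (by omega)

-- the two loop bodies: fail together, or produce pvRel-related accumulators
theorem pv_body_rel (part : List Char) (hg : pvGood part) (res : List Int) (ivs : List (Int × Int))
    (hr : pvRel res ivs) :
    (pvLoopA (some res) part = none ∧ pvParseB (some ivs) part = none) ∨
    (∃ r v, pvLoopA (some res) part = some r ∧ pvParseB (some ivs) part = some v ∧ pvRel r v) := by
  unfold pvLoopA pvParseB
  simp only []
  by_cases hd : '-' ∈ part
  · have hdA : PySem.Chars.isIn ['-'] (PySem.Chars.strip part) = true :=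
      (pv_isIn_singleton _ _).mpr ((pv_mem_strip_dash part).mpr hd)
    have hdB : PySem.Chars.isIn ['-'] part = true := (pv_isIn_singleton _ _).mpr hd
    rw [if_pos hdA, if_pos hdB]
    rw [show PySem.Chars.splitMax? (PySem.Chars.strip part) ['-'] 1
        = some (PySem.Chars.splitOnMax (PySem.Chars.strip part) ['-'] 1) from by
          simp [PySem.Chars.splitMax?]]
    rw [show PySem.Chars.splitMax? part ['-'] 1
        = some (PySem.Chars.splitOnMax part ['-'] 1) from by simp [PySem.Chars.splitMax?]]
    rw [pv_splitOnMax_dash _ ((pv_mem_strip_dash part).mpr hd), pv_splitOnMax_dash _ hd]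
    dsimp only
    obtain ⟨e1, e2⟩ := pv_dash_values part hg hd
    rw [e1, e2]
    cases PySem.Int.ofChars? (part.takeWhile (fun c => c != '-')) with
    | none => exact Or.inl ⟨rfl, rfl⟩
    | some st =>
      cases PySem.Int.ofChars? ((part.dropWhile (fun c => c != '-')).tail) with
      | none => exact Or.inl ⟨rfl, rfl⟩
      | some en => exact Or.inr ⟨_, _, rfl, rfl, pv_rel_range res ivs hr st en⟩
  · have hdA : ¬ PySem.Chars.isIn ['-'] (PySem.Chars.strip part) = true := fun h =>
      hd ((pv_mem_strip_dash part).mp ((pv_isIn_singleton _ _).mp h))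
    have hdB : ¬ PySem.Chars.isIn ['-'] part = true := fun h => hd ((pv_isIn_singleton _ _).mp h)
    rw [if_neg hdA, if_neg hdB, pv_ofChars_strip part hg]
    cases PySem.Int.ofChars? part with
    | none => exact Or.inl ⟨rfl, rfl⟩
    | some n => exact Or.inr ⟨_, _, rfl, rfl, pv_rel_single res ivs hr n⟩

theorem pv_foldA_none (parts : List (List Char)) : parts.foldl pvLoopA none = none := by
  induction parts with
  | nil => rfl
  | cons p ps ih => exact ih

theorem pv_foldB_none (parts : List (List Char)) : parts.foldl pvParseB none = none := by
  induction parts with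
  | nil => rfl
  | cons p ps ih => exact ih

-- fold invariant: A's parse and B's parse fail together or stay pvRel-related
theorem pv_fold_rel :
    ∀ (parts : List (List Char)), (∀ p ∈ parts, pvGood p) →
    ∀ (res : List Int) (ivs : List (Int × Int)), pvRel res ivs →
    (parts.foldl pvLoopA (some res) = none ∧ parts.foldl pvParseB (some ivs) = none) ∨
    (∃ r v, parts.foldl pvLoopA (some res) = some r ∧ parts.foldl pvParseB (some ivs) = some v ∧ pvRel r v) := by
  intro parts
  induction parts with
  | nil => intro _ res ivs hr; exact Or.inr ⟨res, ivs, rfl, rfl, hr⟩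
  | cons p ps ih =>
    intro hg res ivs hr
    rw [List.foldl_cons, List.foldl_cons]
    rcases pv_body_rel p (hg p List.mem_cons_self) res ivs hr with ⟨hA, hB⟩ | ⟨r, v, hA, hB, hrv⟩
    · rw [hA, hB, pv_foldA_none, pv_foldB_none]
      exact Or.inl ⟨rfl, rfl⟩
    · rw [hA, hB]
      exact ih (fun q hq => hg q (List.mem_cons_of_mem _ hq)) r v hrv

-- coverage predicate of an interval list
def pvCov (ivs : List (Int × Int)) (i : Int) : Bool :=
  ivs.any (fun p => decide (p.1 ≤ i) && decide (i ≤ p.2))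

-- A's output from a pvRel-related accumulator: the increasing list of covered lines in [1, M]
theorem pv_A_out (M : Int) (res : List Int) (ivs : List (Int × Int)) (hr : pvRel res ivs) :
    PySem.List.sorted
        (PySem.Set.ofList (res.filter (fun i => decide (1 ≤ i) && decide (i ≤ M))))
        (fun x => x) false
      = (PySem.List.pyRange 1 (M + 1) 1).filter (pvCov ivs) := by
  apply PySem.List.sorted_eq_of_perm_of_pairwise_lt
  · apply (List.perm_ext_iff_of_nodup ?_ ?_).mpr
    · intro x
      rw [PySem.Set.mem_ofList, List.mem_filter, List.mem_filter, hr x,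
        PySem.List.mem_pyRange_one]
      unfold pvCov
      simp only [List.any_eq_true, Bool.and_eq_true, decide_eq_true_eq]
      constructor
      · rintro ⟨⟨h2, h3⟩, p, hp, hx1, hx2⟩
        exact ⟨⟨p, hp, hx1, hx2⟩, h2, by omega⟩
      · rintro ⟨⟨p, hp, hx1, hx2⟩, h2, h3⟩
        exact ⟨⟨h2, by omega⟩, p, hp, hx1, hx2⟩
    · exact List.Pairwise.imp (fun h => ne_of_lt h)
        (List.Pairwise.filter _ (PySem.List.pairwise_lt_pyRange_one 1 (M + 1)))
    · exact PySem.Set.nodup_ofList _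
  · exact List.Pairwise.filter _ (PySem.List.pairwise_lt_pyRange_one 1 (M + 1))

-- the sweep invariant: starting from the covered prefix `filter c` with watermark `bound`,
-- sweeping the lo-sorted intervals S appends exactly the newly covered lines, in order
theorem pv_sweep_inv (M : Int) :
    ∀ (S : List (Int × Int)), S.Pairwise (fun a b => a.1 ≤ b.1) →
    ∀ (c : Int → Bool) (bound : Int),
    (∀ x : Int, 1 ≤ x → x ≤ M → c x = true → x ≤ bound) →
    (∀ q ∈ S, ∀ x : Int, q.1 ≤ x → x ≤ q.2 → 1 ≤ x → x ≤ M → x ≤ bound → c x = true) →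
    (S.foldl (pvSweep M) ((PySem.List.pyRange 1 (M + 1) 1).filter c, bound)).1
      = (PySem.List.pyRange 1 (M + 1) 1).filter (fun i => c i || pvCov S i) := by
  intro S
  induction S with
  | nil =>
    intro _ c bound _ _
    rw [List.foldl_nil]
    exact (List.filter_congr (fun x _ => by simp [pvCov])).symm
  | cons p S ih =>
    intro hpw c bound H1 H2
    have hpwS : S.Pairwise (fun a b => a.1 ≤ b.1) := hpw.tail
    have hhead : ∀ q ∈ S, p.1 ≤ q.1 := fun q hq => List.rel_of_pairwise_cons hpw hq
    rw [List.foldl_cons]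
    have hcov_cons : ∀ i : Int,
        (c i || pvCov (p :: S) i) = ((c i || (decide (p.1 ≤ i) && decide (i ≤ p.2))) || pvCov S i) := by
      intro i
      unfold pvCov
      rw [List.any_cons, Bool.or_assoc]
    by_cases hle : max (max p.1 1) (bound + 1) ≤ min p.2 M
    · -- emit case
      set lo := max (max p.1 1) (bound + 1) with hlo
      set hi := min p.2 M with hhi
      have step : pvSweep M ((PySem.List.pyRange 1 (M + 1) 1).filter c, bound) p
          = ((PySem.List.pyRange 1 (M + 1) 1).filter c ++ PySem.List.pyRange lo (hi + 1) 1, hi) := by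
        unfold pvSweep
        rw [if_pos hle]
      rw [step]
      have hlo1 : 1 ≤ lo := by omega
      have hhiM : hi ≤ M := by omega
      -- the appended accumulator is exactly `filter c'` for c' = c ∨ covered-by-p
      have hsplit : PySem.List.pyRange 1 (M + 1) 1
          = PySem.List.pyRange 1 lo 1 ++ PySem.List.pyRange lo (hi + 1) 1
            ++ PySem.List.pyRange (hi + 1) (M + 1) 1 := by
        rw [PySem.List.pyRange_one_append 1 lo (M + 1) hlo1 (by omega),
          PySem.List.pyRange_one_append lo (hi + 1) (M + 1) (by omega) (by omega)]
        simp [List.append_assoc]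
      have hacc : (PySem.List.pyRange 1 (M + 1) 1).filter c ++ PySem.List.pyRange lo (hi + 1) 1
          = (PySem.List.pyRange 1 (M + 1) 1).filter
              (fun i => c i || (decide (p.1 ≤ i) && decide (i ≤ p.2))) := by
        rw [hsplit]
        simp only [List.filter_append, List.append_assoc]
        -- low segment: below lo nothing new is covered
        have e1 : (PySem.List.pyRange 1 lo 1).filter (fun i => c i || (decide (p.1 ≤ i) && decide (i ≤ p.2)))
            = (PySem.List.pyRange 1 lo 1).filter c := by
          apply List.filter_congr
          intro x hx
          rw [PySem.List.mem_pyRange_one] at hx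
          by_cases hcp : (decide (p.1 ≤ x) && decide (x ≤ p.2)) = true
          · simp only [Bool.and_eq_true, decide_eq_true_eq] at hcp
            have hxb : x ≤ bound := by omega
            rw [H2 p List.mem_cons_self x hcp.1 hcp.2 (by omega) (by omega) hxb]
            simp
          · rw [Bool.eq_false_iff.mpr hcp, Bool.or_false]
        -- middle segment: everything is newly covered, nothing was covered before
        have e2 : (PySem.List.pyRange lo (hi + 1) 1).filter
              (fun i => c i || (decide (p.1 ≤ i) && decide (i ≤ p.2)))
            = PySem.List.pyRange lo (hi + 1) 1 := by
          apply List.filter_eq_self.mpr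
          intro x hx
          rw [PySem.List.mem_pyRange_one] at hx
          have : (decide (p.1 ≤ x) && decide (x ≤ p.2)) = true := by
            simp only [Bool.and_eq_true, decide_eq_true_eq]
            omega
          rw [this, Bool.or_true]
        have e3 : (PySem.List.pyRange lo (hi + 1) 1).filter c = [] := by
          apply List.filter_eq_nil_iff.mpr
          intro x hx
          rw [PySem.List.mem_pyRange_one] at hx
          intro hc
          have := H1 x (by omega) (by omega) hc
          omega
        -- high segment: covered by neither
        have e4 : ∀ cc : Int → Bool, (∀ x : Int, hi + 1 ≤ x → x < M + 1 → cc x = false) →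
            (PySem.List.pyRange (hi + 1) (M + 1) 1).filter cc = [] := by
          intro cc hcc
          apply List.filter_eq_nil_iff.mpr
          intro x hx
          rw [PySem.List.mem_pyRange_one] at hx
          rw [hcc x hx.1 hx.2]
          simp
        have e5 : (PySem.List.pyRange (hi + 1) (M + 1) 1).filter c = [] := by
          apply e4
          intro x h1 h2
          cases hc : c x
          · rfl
          · have := H1 x (by omega) (by omega) hc
            omega
        have e6 : (PySem.List.pyRange (hi + 1) (M + 1) 1).filter
              (fun i => c i || (decide (p.1 ≤ i) && decide (i ≤ p.2))) = [] := by
          apply e4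
          intro x h1 h2
          cases hc : c x
          · simp only [Bool.false_or, Bool.and_eq_false_iff]
            right
            simp only [decide_eq_false_iff_not]
            omega
          · have := H1 x (by omega) (by omega) hc
            omega
        rw [e1, e2, e3, e5, e6]
        simp
      rw [hacc]
      have hres := ih hpwS (fun i => c i || (decide (p.1 ≤ i) && decide (i ≤ p.2))) hi
        (by
          intro x hx1 hxM hc
          simp only [Bool.or_eq_true, Bool.and_eq_true, decide_eq_true_eq] at hc
          rcases hc with hc | hc
          · have := H1 x hx1 hxM hc
            omega
          · omega)
        (by
          intro q hq x hq1 hq2 hx1 hxM hxhi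
          simp only [Bool.or_eq_true, Bool.and_eq_true, decide_eq_true_eq]
          by_cases hxb : x ≤ bound
          · exact Or.inl (H2 q (List.mem_cons_of_mem _ hq) x hq1 hq2 hx1 hxM hxb)
          · have hp1 : p.1 ≤ x := le_trans (hhead q hq) hq1
            exact Or.inr ⟨hp1, by omega⟩)
      rw [hres]
      apply List.filter_congr
      intro x _
      show (c x || (decide (p.1 ≤ x) && decide (x ≤ p.2)) || pvCov S x) = (c x || pvCov (p :: S) x)
      exact (hcov_cons x).symm
    · -- skip case: the interval adds no line of [1, M] not already emitted
      have step : pvSweep M ((PySem.List.pyRange 1 (M + 1) 1).filter c, bound)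
          p = ((PySem.List.pyRange 1 (M + 1) 1).filter c, bound) := by
        unfold pvSweep
        rw [if_neg hle]
      rw [step]
      have hnothing : ∀ x : Int, 1 ≤ x → x ≤ M → (decide (p.1 ≤ x) && decide (x ≤ p.2)) = true →
          c x = true := by
        intro x h1 hM hcp
        simp only [Bool.and_eq_true, decide_eq_true_eq] at hcp
        have hxb : x ≤ bound := by omega
        exact H2 p List.mem_cons_self x hcp.1 hcp.2 h1 hM hxb
      have hres := ih hpwS c bound H1
        (fun q hq x h1 h2 h3 h4 h5 => H2 q (List.mem_cons_of_mem _ hq) x h1 h2 h3 h4 h5)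
      rw [hres]
      apply List.filter_congr
      intro x hx
      rw [PySem.List.mem_pyRange_one] at hx
      rw [hcov_cons x]
      by_cases hcp : (decide (p.1 ≤ x) && decide (x ≤ p.2)) = true
      · rw [hnothing x (by omega) (by omega) hcp]
        simp
      · rw [Bool.eq_false_iff.mpr hcp, Bool.or_false]

-- B's output from an interval list: the increasing list of covered lines in [1, M]
theorem pv_B_out (M : Int) (ivs : List (Int × Int)) :
    ((PySem.List.sorted ivs (fun p => p.1) false).foldl (pvSweep M) ([], 0)).1
      = (PySem.List.pyRange 1 (M + 1) 1).filter (pvCov ivs) := by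
  have h0 : ((PySem.List.pyRange 1 (M + 1) 1).filter (fun _ => false) : List Int) = [] := by
    simp
  have := pv_sweep_inv M (PySem.List.sorted ivs (fun p => p.1) false)
    (PySem.List.sorted_pairwise ivs (fun p => p.1)) (fun _ => false) 0
    (by intro x _ _ h; cases h) (by intro q _ x _ _ h1 _ h2; omega)
  rw [h0] at this
  rw [this]
  apply List.filter_congr
  intro x _
  show (false || pvCov (PySem.List.sorted ivs (fun p => p.1) false) x) = pvCov ivs x
  rw [Bool.false_or]
  unfold pvCov
  exact List.Perm.any_eq (PySem.List.sorted_perm ivs (fun p => p.1) false)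

-- main equivalence
theorem pv_main (spec : String) (M : Int) (hdom : Dom_parse_line_spec spec M) :
    parse_line_spec spec M = parse_line_spec_alt spec M := by
  have hdomc : ∀ c ∈ spec.toList, pvDomChar c = true := by
    unfold Dom_parse_line_spec pvDomStr at hdom
    simp only [Bool.and_eq_true, List.all_eq_true] at hdom
    exact fun c hc => hdom.1 c hc
  have hgood : pvGood spec.toList := fun c hc hs => pv_dom_space c (hdomc c hc) hs
  unfold parse_line_spec parse_line_spec_alt
  dsimp only
  by_cases hc : PySem.Chars.isIn [','] spec.toList = true
  · -- comma branch of A vs B's fold over the same parts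
    rw [if_pos hc]
    have hparts : ∀ p ∈ PySem.Chars.splitOn spec.toList [','], pvGood p := by
      intro p hp c hcp hs
      exact pv_dom_space c
        (pv_splitOn_chars spec.toList [','] (fun c => pvDomChar c = true) hdomc p hp c hcp) hs
    rcases pv_fold_rel (PySem.Chars.splitOn spec.toList [',']) hparts [] [] pv_rel_nil with
      ⟨hA, hB⟩ | ⟨r, v, hA, hB, hrv⟩
    · rw [hA, hB]
    · rw [hA, hB]
      dsimp only
      rw [pv_A_out M r v hrv, pv_B_out M v]
  · -- comma-free: B folds over the singleton [spec]
    rw [if_neg hc]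
    have hnc : ',' ∉ spec.toList := fun hm => hc ((pv_isIn_singleton ',' spec.toList).mpr hm)
    rw [pv_splitOn_no_sep spec.toList hnc, List.foldl_cons, List.foldl_nil]
    unfold pvParseB
    dsimp only
    by_cases hd : PySem.Chars.isIn ['-'] spec.toList = true
    · -- range branch
      rw [if_pos hd, if_pos hd]
      have hmem : '-' ∈ spec.toList := (pv_isIn_singleton _ _).mp hd
      rw [show PySem.Chars.splitMax? spec.toList ['-'] 1
          = some (PySem.Chars.splitOnMax spec.toList ['-'] 1) from by simp [PySem.Chars.splitMax?]]
      rw [pv_splitOnMax_dash _ hmem]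
      dsimp only
      have hga : pvGood (spec.toList.takeWhile (fun c => c != '-')) :=
        pv_good_of_sublist (List.takeWhile_sublist _) hgood
      have hgb : pvGood ((spec.toList.dropWhile (fun c => c != '-')).tail) :=
        pv_good_of_sublist ((List.tail_sublist _).trans (List.dropWhile_sublist _)) hgood
      rw [pv_ofChars_strip _ hga, pv_ofChars_strip _ hgb]
      cases h1 : PySem.Int.ofChars? (spec.toList.takeWhile (fun c => c != '-')) with
      | none => rfl
      | some st =>
        cases h2 : PySem.Int.ofChars? ((spec.toList.dropWhile (fun c => c != '-')).tail) with
        | none => rfl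
        | some en =>
          dsimp only
          have hrel : pvRel (PySem.List.pyRange st (en + 1) 1) ([] ++ [(st, en)]) := by
            have := pv_rel_range [] [] pv_rel_nil st en
            simpa using this
          rw [pv_A_out M _ _ hrel, pv_B_out M]
    · -- single-number branch
      rw [if_neg hd, if_neg hd]
      cases hn : PySem.Int.ofChars? spec.toList with
      | none => rfl
      | some n =>
        simp only [Option.map_some]
        have hrel : pvRel [n] ([] ++ [(n, n)]) := by
          have := pv_rel_single [] [] pv_rel_nil n
          simpa using this
        rw [pv_A_out M _ _ hrel, pv_B_out M]

-- ===== VERDICT (by name: the statement is the Claim_ definition above) =====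
theorem parse_line_spec_spec : Claim_equal_parse_line_spec := by
  intro spec M hdom
  unfold Spec_parse_line_spec
  exact pv_main spec M hdom
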